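-- pv_equiv track=rewrite | github.com/RohanSanghera/gfdc | algorithm.py | final_class
-- ===== SOURCE A (Python) =====
-- def final_class(dev_class, cp_class, plot_class):
--     if any(var == 'SEVERE' for var in [dev_class, cp_class, plot_class]):
--         return 'SEVERE'
--     elif any(var == 'MODERATE' for var in [dev_class, cp_class, plot_class]):
--         return 'MODERATE'
--     elif any(var == 'MILD' for var in [dev_class, cp_class, plot_class]):
--         return 'MILD'
--     elif any(var == 'NO DEFECT' for var in [dev_class, cp_class, plot_class]):
--         return 'NO DEFECT'
-- ===== SOURCE B (Python) =====
-- _RANK = {'NO DEFECT': 0, 'MILD': 1, 'MODERATE': 2, 'SEVERE': 3}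
-- _LABELS = ['NO DEFECT', 'MILD', 'MODERATE', 'SEVERE']
--
-- def final_class(dev_class, cp_class, plot_class):
--     ranks = [_RANK[v] for v in (dev_class, cp_class, plot_class) if v in _RANK]
--     if not ranks:
--         return None
--     return _LABELS[max(ranks)]
-- ===== Notes on version B (the rewrite author's own statement) =====
-- stated objective: simpler
-- what changed: Replaces the four ordered any-scans over the three inputs with one severity-rank table: map each recognised input to its rank, take the max, and map the rank back to its label (None if no input is recognised).
import Mathlib
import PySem

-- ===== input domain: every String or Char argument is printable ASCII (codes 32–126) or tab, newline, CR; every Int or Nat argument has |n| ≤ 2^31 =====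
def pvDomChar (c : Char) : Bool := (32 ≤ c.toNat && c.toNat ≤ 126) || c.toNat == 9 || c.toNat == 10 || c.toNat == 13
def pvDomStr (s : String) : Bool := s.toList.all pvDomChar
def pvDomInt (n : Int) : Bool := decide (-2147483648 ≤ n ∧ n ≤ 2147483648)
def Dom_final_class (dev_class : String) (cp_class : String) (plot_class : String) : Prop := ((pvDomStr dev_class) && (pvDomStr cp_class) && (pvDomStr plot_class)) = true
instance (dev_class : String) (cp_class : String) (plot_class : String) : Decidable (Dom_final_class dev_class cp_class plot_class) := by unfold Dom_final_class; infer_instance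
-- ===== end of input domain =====

-- ===== PORT A =====
def final_class (dev_class : String) (cp_class : String) (plot_class : String) : Option String :=
  if [dev_class, cp_class, plot_class].any (fun v => v == "SEVERE") then some "SEVERE"
  else if [dev_class, cp_class, plot_class].any (fun v => v == "MODERATE") then some "MODERATE"
  else if [dev_class, cp_class, plot_class].any (fun v => v == "MILD") then some "MILD"
  else if [dev_class, cp_class, plot_class].any (fun v => v == "NO DEFECT") then some "NO DEFECT"
  else none

-- ===== PORT B =====
-- severity table and label list, as in Source B
-- dict literal of Source B (distinct keys), as a PySem.Dict
def pvRank : PySem.Dict String Nat :=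
  PySem.Dict.mk [("NO DEFECT", 0), ("MILD", 1), ("MODERATE", 2), ("SEVERE", 3)]

def pvLabels : List String := ["NO DEFECT", "MILD", "MODERATE", "SEVERE"]

def final_class_alt (dev_class : String) (cp_class : String) (plot_class : String) : Option String :=
  let ranks := [dev_class, cp_class, plot_class].filterMap (fun v => pvRank.get? v)
  match ranks.max? with
  | none => none
  | some m => pvLabels[m]?

-- ===== PRECONDITION & SPEC =====
def Spec_final_class (dev_class : String) (cp_class : String) (plot_class : String) (out : Option String) : Prop := out = final_class_alt dev_class cp_class plot_class
instance (dev_class : String) (cp_class : String) (plot_class : String) (out : Option String) : Decidable (Spec_final_class dev_class cp_class plot_class out) := by unfold Spec_final_class; infer_instance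

-- ===== CLAIM (what is proved, stated in full; the proofs are below) =====
def Claim_equal_final_class : Prop := ∀ (dev_class : String) (cp_class : String) (plot_class : String), Dom_final_class dev_class cp_class plot_class → Spec_final_class dev_class cp_class plot_class (final_class dev_class cp_class plot_class)

-- ===== LEMMAS AND PROOFS =====

-- ===== VERDICT (by name: the statement is the Claim_ definition above) =====
-- testing a string against one of the four labels is the same as its rank-table lookup hitting that rank
theorem rank_sev (s : String) : (s == "SEVERE") = (pvRank.get? s == some 3) := by
  by_cases h1 : "NO DEFECT" = s <;> by_cases h2 : "MILD" = s <;> by_cases h3 : "MODERATE" = s <;> by_cases h4 : "SEVERE" = s <;>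
    (try subst s) <;> simp_all [pvRank, PySem.Dict.get?, ne_comm]

theorem rank_mod (s : String) : (s == "MODERATE") = (pvRank.get? s == some 2) := by
  by_cases h1 : "NO DEFECT" = s <;> by_cases h2 : "MILD" = s <;> by_cases h3 : "MODERATE" = s <;> by_cases h4 : "SEVERE" = s <;>
    (try subst s) <;> simp_all [pvRank, PySem.Dict.get?, ne_comm]

theorem rank_mild (s : String) : (s == "MILD") = (pvRank.get? s == some 1) := by
  by_cases h1 : "NO DEFECT" = s <;> by_cases h2 : "MILD" = s <;> by_cases h3 : "MODERATE" = s <;> by_cases h4 : "SEVERE" = s <;>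
    (try subst s) <;> simp_all [pvRank, PySem.Dict.get?, ne_comm]

theorem rank_nodef (s : String) : (s == "NO DEFECT") = (pvRank.get? s == some 0) := by
  by_cases h1 : "NO DEFECT" = s <;> by_cases h2 : "MILD" = s <;> by_cases h3 : "MODERATE" = s <;> by_cases h4 : "SEVERE" = s <;>
    (try subst s) <;> simp_all [pvRank, PySem.Dict.get?, ne_comm]

-- the rank table only ever yields ranks 0..3 (or a miss)
theorem rank_cases (s : String) : pvRank.get? s = none ∨ pvRank.get? s = some 0 ∨ pvRank.get? s = some 1 ∨ pvRank.get? s = some 2 ∨ pvRank.get? s = some 3 := by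
  simp only [pvRank, PySem.Dict.get?_mk_cons]
  split_ifs <;> simp [PySem.Dict.get?]

theorem final_class_spec : Claim_equal_final_class := by
  intro d c p _
  unfold Spec_final_class final_class final_class_alt
  simp only [List.any_cons, List.any_nil, Bool.or_false]
  rw [rank_sev d, rank_sev c, rank_sev p, rank_mod d, rank_mod c, rank_mod p,
      rank_mild d, rank_mild c, rank_mild p, rank_nodef d, rank_nodef c, rank_nodef p]
  rcases rank_cases d with hd | hd | hd | hd | hd <;>
  rcases rank_cases c with hc | hc | hc | hc | hc <;>
  rcases rank_cases p with hp | hp | hp | hp | hp <;>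
    simp [hd, hc, hp, pvLabels, List.max?]
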